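-- pv_equiv track=rewrite | github.com/gustkdxo007/Solving-Algorithm | PROGRAMMERS/PROBLEM/최고의집합.py | solution
-- ===== SOURCE A (Python) =====
-- def solution(n, s):
--     if s < n:
--         return [-1]
--     answer = [s//n] * n
--     idx = len(answer) - 1
--     for _ in range(s%n):
--         answer[idx] += 1
--         idx -= 1
--     return answer
-- ===== SOURCE B (Python) =====
-- def solution(n, s):
--     if s < n:
--         return [-1]
--     answer = []
--     for i in range(n, 0, -1):
--         v = s // i
--         answer.append(v)
--         s -= v
--     return answer
-- ===== Notes on version B (the rewrite author's own statement) =====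
-- stated objective: alternative
-- what changed: Replaces A's single divmod followed by a backward in-place +1 loop with a greedy forward pass that never computes s%n: at each step it emits s // (remaining count) and subtracts it from the running sum, which provably yields the same maximal-product distribution.
import Mathlib
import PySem

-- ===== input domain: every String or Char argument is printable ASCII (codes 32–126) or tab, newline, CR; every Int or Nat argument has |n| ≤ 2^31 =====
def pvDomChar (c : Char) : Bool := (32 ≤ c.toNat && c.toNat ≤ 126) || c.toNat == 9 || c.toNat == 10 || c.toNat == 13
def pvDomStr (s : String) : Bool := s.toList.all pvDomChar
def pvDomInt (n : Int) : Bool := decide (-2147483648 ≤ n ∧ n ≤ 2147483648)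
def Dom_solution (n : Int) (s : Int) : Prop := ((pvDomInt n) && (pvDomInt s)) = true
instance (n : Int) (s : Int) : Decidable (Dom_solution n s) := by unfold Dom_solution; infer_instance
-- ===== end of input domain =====

-- B replaces A's divmod + backward increment loop by a greedy forward pass emitting s // (remaining count) (objective: alternative).

-- ===== PORT A =====
-- loop body: answer[idx] += 1; idx -= 1
def pvStepA (st : List Int × Int) : List Int × Int :=
  (PySem.List.pySetD st.1 st.2 (PySem.List.pyGetD st.1 st.2 0 + 1), st.2 - 1)

def solution (n : Int) (s : Int) : List Int :=
  if s < n then [-1]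
  else
    let answer := List.replicate n.toNat (PySem.Int.floordiv s n)
    let st := (PySem.List.pyRange 0 (PySem.Int.mod s n) 1).foldl
      (fun st _ => pvStepA st) (answer, PySem.List.len answer - 1)
    st.1

-- ===== PORT B =====
-- loop body: v = s // i; answer.append(v); s -= v
def pvStepB (st : List Int × Int) (i : Int) : List Int × Int :=
  let v := PySem.Int.floordiv st.2 i
  (st.1 ++ [v], st.2 - v)

def solution_alt (n : Int) (s : Int) : List Int :=
  if s < n then [-1]
  else ((PySem.List.pyRange n 0 (-1)).foldl pvStepB (([] : List Int), s)).1

-- ===== PRECONDITION & SPEC =====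
-- Pre_ excludes exactly n = 0 with 0 ≤ s, where the Python A raises ZeroDivisionError (s//n).
def Pre_solution (n : Int) (s : Int) : Prop := ¬ (n = 0 ∧ 0 ≤ s)
instance (n : Int) (s : Int) : Decidable (Pre_solution n s) := by unfold Pre_solution; infer_instance
def pvWitness_solution : Int × Int := (3, 10)

def Spec_solution (n : Int) (s : Int) (out : List Int) : Prop := out = solution_alt n s
instance (n : Int) (s : Int) (out : List Int) : Decidable (Spec_solution n s out) := by unfold Spec_solution; infer_instance

-- ===== CLAIM (what is proved, stated in full; the proofs are below) =====
def Claim_equal_solution : Prop := ∀ (n : Int) (s : Int), Dom_solution n s → Pre_solution n s → Spec_solution n s (solution n s)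

-- ===== LEMMAS AND PROOFS =====

-- a fold whose step ignores the element is an iterate
theorem pv_foldl_ignore {α σ : Type} (F : σ → σ) (l : List α) (init : σ) :
    l.foldl (fun st _ => F st) init = F^[l.length] init := by
  induction l generalizing init with
  | nil => rfl
  | cons x xs ih =>
      simp [List.foldl_cons, ih, Function.iterate_succ_apply]

-- setting the slot just before the q+1 tail turns one q into q+1
theorem pv_set_replicate (q v : Int) (a j : Nat) (ha : 0 < a) :
    (List.replicate a q ++ List.replicate j v).set (a - 1) v
      = List.replicate (a - 1) q ++ List.replicate (j + 1) v := by
  rw [List.set_eq_take_cons_drop v (by simp; omega)]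
  rw [List.take_append_of_le_length (by simp), List.take_replicate]
  rw [List.drop_append_of_le_length (by simp; omega)]
  have h1 : a - 1 + 1 = a := by omega
  rw [h1, List.drop_replicate]
  simp [List.replicate_succ]

-- A-side loop invariant: after j of the r backward increments the tail j slots hold q+1
theorem pv_loop_inv (q : Int) (m j : Nat) (hj : j ≤ m) :
    pvStepA^[j] (List.replicate m q, (m : Int) - 1)
      = (List.replicate (m - j) q ++ List.replicate j (q + 1), (m : Int) - j - 1) := by
  induction j with
  | zero => simp
  | succ j ih =>
      have hj' : j ≤ m := Nat.le_of_succ_le hj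
      rw [Function.iterate_succ_apply', ih hj']
      have hidx : ((m : Int) - j - 1) = ((m - j - 1 : Nat) : Int) := by omega
      unfold pvStepA
      dsimp only
      rw [hidx, PySem.List.pySetD_natCast, PySem.List.pyGetD_natCast]
      have hget : (List.replicate (m - j) q ++ List.replicate j (q + 1)).getD (m - j - 1) 0 = q := by
        rw [List.getD_eq_getElem _ _ (by simp; omega)]
        rw [List.getElem_append_left (by simp; omega)]
        simp
      rw [hget]
      have hstep := pv_set_replicate q (q + 1) (m - j) j (by omega)
      have e1 : m - j - 1 = m - (j + 1) := by omega
      rw [hstep, e1]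
      refine Prod.ext rfl (by dsimp only; omega)

-- B-side greedy invariant: folding over range(i, 0, -1) with running sum q*i + r (0 ≤ r < i)
-- appends i - r copies of q followed by r copies of q + 1
theorem pv_greedy (i : Nat) (q r : Int) (acc : List Int) (hr0 : 0 ≤ r) (hri : r < (i : Int)) :
    (PySem.List.pyRange (i : Int) 0 (-1)).foldl pvStepB (acc, q * i + r)
      = (acc ++ List.replicate (i - r.toNat) q ++ List.replicate r.toNat (q + 1), 0) := by
  induction i generalizing q r acc with
  | zero => omega
  | succ i ih =>
      have hcons : PySem.List.pyRange ((i + 1 : Nat) : Int) 0 (-1)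
          = ((i + 1 : Nat) : Int) :: PySem.List.pyRange (((i + 1 : Nat) : Int) - 1) 0 (-1) :=
        PySem.List.pyRange_neg_one_cons (by exact_mod_cast Nat.succ_pos i)
      have hsub : (((i + 1 : Nat) : Int) - 1) = (i : Int) := by push_cast; ring
      rw [hcons, hsub, List.foldl_cons]
      have hv : PySem.Int.floordiv (q * ((i + 1 : Nat) : Int) + r) ((i + 1 : Nat) : Int) = q := by
        rw [PySem.Int.floordiv_eq_iff_of_pos (by exact_mod_cast Nat.succ_pos i)]
        constructor <;> nlinarith
      have hstep : pvStepB (acc, q * ((i + 1 : Nat) : Int) + r) ((i + 1 : Nat) : Int)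
          = (acc ++ [q], q * (i : Int) + r) := by
        unfold pvStepB
        rw [hv]
        refine Prod.ext rfl ?_
        dsimp only; push_cast; ring
      rw [hstep]
      by_cases hlt : r < (i : Int)
      · rw [ih q r (acc ++ [q]) hr0 hlt]
        have hrep : List.replicate (i + 1 - r.toNat) q = q :: List.replicate (i - r.toNat) q := by
          rw [show i + 1 - r.toNat = (i - r.toNat) + 1 by omega, List.replicate_succ]
        simp [hrep]
      · -- r = i; the remaining sum is (q+1)*i + 0
        have hre : r = (i : Int) := by omega
        by_cases hi0 : i = 0
        · subst hi0
          have : r = 0 := by omega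
          subst this
          simp [PySem.List.pyRange_neg_one_eq_nil (by norm_num : (0 : Int) ≤ 0)]
        · have hi : (0 : Int) < (i : Int) := by exact_mod_cast Nat.pos_of_ne_zero hi0
          have hsum : q * (i : Int) + r = (q + 1) * (i : Int) + 0 := by rw [hre]; ring
          rw [hsum, ih (q + 1) 0 (acc ++ [q]) le_rfl hi]
          have h1 : (i + 1) - r.toNat = 1 := by omega
          have h2 : i - (0 : Int).toNat = i := by simp
          have h3 : r.toNat = i := by omega
          simp [h1, h3, List.replicate_succ]

-- ===== VERDICT (by name: the statement is the Claim_ definition above) =====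
theorem solution_spec : Claim_equal_solution := by
  intro n s _ hpre
  unfold Spec_solution solution solution_alt
  by_cases hlt : s < n
  · simp [hlt]
  · simp only [if_neg hlt]
    by_cases hn : 0 < n
    · -- n > 0: r = s % n with 0 ≤ r < n
      set q := PySem.Int.floordiv s n with hq
      set r := PySem.Int.mod s n with hr
      have hr0 : 0 ≤ r := PySem.Int.mod_nonneg s hn
      have hrn : r < n := PySem.Int.mod_lt s hn
      have hm : ((n.toNat : Nat) : Int) = n := by omega
      -- A side: iterate of the backward increment
      have hlenr : (PySem.List.pyRange 0 r 1).length = r.toNat := by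
        rw [PySem.List.length_pyRange_one]; omega
      rw [pv_foldl_ignore, hlenr]
      have hlenA : PySem.List.len (List.replicate n.toNat q) - 1 = (n.toNat : Int) - 1 := by
        simp [PySem.List.len_eq]
      rw [hlenA, pv_loop_inv q n.toNat r.toNat (by omega)]
      -- B side: greedy fold
      have hs : s = q * ((n.toNat : Nat) : Int) + r := by
        rw [hm]
        have := PySem.Int.floordiv_mul_add_mod s n
        rw [← hq, ← hr] at this
        linarith
      rw [← hm, hs, pv_greedy n.toNat q r [] hr0 (by omega)]
      simp only [List.nil_append]
      congr 2
      all_goals omega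
    · -- n ≤ 0: with Pre_ and ¬ s < n we have n < 0; both sides return []
      have hn0 : n < 0 := by
        rcases lt_or_eq_of_le (le_of_not_gt hn) with h | h
        · exact h
        · exfalso; exact hpre ⟨h, by omega⟩
      have hr' := PySem.Int.mod_neg_bounds s (b := n) hn0
      have hrangeA : PySem.List.pyRange 0 (PySem.Int.mod s n) 1 = [] :=
        PySem.List.pyRange_one_eq_nil (by omega)
      have hrangeB : PySem.List.pyRange n 0 (-1) = [] :=
        PySem.List.pyRange_neg_one_eq_nil (by omega)
      have hnt : n.toNat = 0 := by omega
      rw [hrangeA, hrangeB]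
      simp [hnt]
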